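-- pv_equiv track=rewrite | github.com/mbrichman/scry | scripts/utils/docx_probe.py | has_code_like_content
-- ===== SOURCE A (Python) =====
-- def has_code_like_content(text: str) -> bool:
--     """Detect if text contains code-like content."""
--     indicators = [
--         '```',              # Markdown code fence
--         'def ',             # Python function
--         'function ',        # JavaScript function
--         'class ',           # Class definition
--         '    ',             # Indentation (4 spaces)
--         '\t',               # Tab indentation
--         '{',                # Braces
--         '};',               # Statement terminator
--         'import ',          # Import statement
--         '#include',         # C include
--     ]
--
--     return any(ind in text for ind in indicators)
-- ===== SOURCE B (Python) =====
-- def has_code_like_content(text: str) -> bool: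
--     """Detect if text contains code-like content (single left-to-right scan)."""
--     indicators = (
--         '```', 'def ', 'function ', 'class ', '    ', '\t',
--         '{', '};', 'import ', '#include',
--     )
--     for i in range(len(text)):
--         if any(text.startswith(ind, i) for ind in indicators):
--             return True
--     return False
-- ===== Notes on version B (the rewrite author's own statement) =====
-- stated objective: alternative
-- what changed: B makes one left-to-right pass over the text, testing at each position whether any of the ten indicators starts there, instead of A's ten separate full substring scans.
import Mathlib
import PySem

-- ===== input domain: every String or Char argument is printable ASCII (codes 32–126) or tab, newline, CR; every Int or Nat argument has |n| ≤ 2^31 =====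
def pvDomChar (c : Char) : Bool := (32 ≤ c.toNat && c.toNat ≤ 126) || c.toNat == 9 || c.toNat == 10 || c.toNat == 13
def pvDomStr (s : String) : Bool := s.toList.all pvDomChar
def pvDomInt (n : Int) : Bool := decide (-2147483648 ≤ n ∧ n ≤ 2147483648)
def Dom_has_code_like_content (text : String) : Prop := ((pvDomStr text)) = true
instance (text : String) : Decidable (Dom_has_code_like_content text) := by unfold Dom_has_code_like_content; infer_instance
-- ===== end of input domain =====

-- B replaces A's ten separate substring scans with one left-to-right pass testing each position; objective: alternative.


-- ===== PORT A =====
def codeIndicators : List String :=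
  ["```", "def ", "function ", "class ", "    ", "\t", "{", "};", "import ", "#include"]

-- any(ind in text for ind in indicators)
def has_code_like_content (text : String) : Bool :=
  codeIndicators.any (fun ind => PySem.Str.isIn ind text)

-- ===== PORT B =====
-- one scan over the character list: at each position, test whether some indicator starts there
def altScan (cs : List Char) : Bool :=
  match cs with
  | [] => false
  | _ :: rest =>
    (codeIndicators.any (fun ind => PySem.Chars.startswith cs ind.toList)) || altScan rest

def has_code_like_content_alt (text : String) : Bool :=
  altScan text.toList

-- ===== PRECONDITION & SPEC =====
def Spec_has_code_like_content (text : String) (out : Bool) : Prop := out = has_code_like_content_alt text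
instance (text : String) (out : Bool) : Decidable (Spec_has_code_like_content text out) := by unfold Spec_has_code_like_content; infer_instance

-- ===== CLAIM (what is proved, stated in full; the proofs are below) =====
def Claim_equal_has_code_like_content : Prop := ∀ (text : String), Dom_has_code_like_content text → Spec_has_code_like_content text (has_code_like_content text)

-- ===== LEMMAS AND PROOFS =====

-- B's scan finds exactly the infix occurrences of some indicator
theorem altScan_iff (cs : List Char) :
    altScan cs = true ↔ ∃ ind ∈ codeIndicators, ind.toList <:+: cs := by
  induction cs with
  | nil =>
    simp only [altScan, List.infix_nil]
    decide
  | cons c rest ih =>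
    simp only [altScan, Bool.or_eq_true, List.any_eq_true, ih]
    constructor
    · rintro (⟨ind, hmem, hsw⟩ | ⟨ind, hmem, hinf⟩)
      · exact ⟨ind, hmem, ((PySem.Chars.startswith_iff _ _).mp hsw).isInfix⟩
      · exact ⟨ind, hmem, List.infix_cons_iff.mpr (Or.inr hinf)⟩
    · rintro ⟨ind, hmem, hinf⟩
      rcases List.infix_cons_iff.mp hinf with hpre | hinf'
      · exact Or.inl ⟨ind, hmem, (PySem.Chars.startswith_iff _ _).mpr hpre⟩
      · exact Or.inr ⟨ind, hmem, hinf'⟩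

-- ===== VERDICT (by name: the statement is the Claim_ definition above) =====
theorem has_code_like_content_spec : Claim_equal_has_code_like_content := by
  intro text _
  unfold Spec_has_code_like_content has_code_like_content has_code_like_content_alt
  have h : (codeIndicators.any (fun ind => PySem.Str.isIn ind text) = true)
      ↔ (altScan text.toList = true) := by
    simp only [List.any_eq_true, altScan_iff, PySem.Str.isIn_iff_infix]
  rcases Bool.eq_false_or_eq_true (altScan text.toList) with hb | hb <;>
    simp_all
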